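-- pv_equiv track=rewrite | github.com/jerome-white/pyzrt | corpus.py | orange
-- ===== SOURCE A (Python) =====
-- def orange(start, stop, step, offset=None):
--     i = start
--     while i < stop:
--         if offset is not None:
--             j = i + offset
--             offset = None
--         else:
--             j = i + step
--         j = min(j, stop)
--
--         yield (i, j)
--         i = j
-- ===== SOURCE B (Python) =====
-- def orange(start, stop, step, offset=None):
--     # Closed form: compute the full boundary list via range(), then pair consecutive points.
--     if start >= stop:
--         return
--     first = min(start + (step if offset is None else offset), stop)
--     points = [start, first]
--     if first < stop:
--         points.extend(range(first + step, stop, step))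
--         points.append(stop)
--     yield from zip(points, points[1:])
-- ===== Notes on version B (the rewrite author's own statement) =====
-- stated objective: alternative
-- what changed: A emits (i,j) pairs while advancing a single while loop with a mutable one-shot offset; B computes the whole boundary list in closed form (start, the offset/step-capped first point, then range(first+step, stop, step) and the final stop) and pairs consecutive points with zip.
import Mathlib
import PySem

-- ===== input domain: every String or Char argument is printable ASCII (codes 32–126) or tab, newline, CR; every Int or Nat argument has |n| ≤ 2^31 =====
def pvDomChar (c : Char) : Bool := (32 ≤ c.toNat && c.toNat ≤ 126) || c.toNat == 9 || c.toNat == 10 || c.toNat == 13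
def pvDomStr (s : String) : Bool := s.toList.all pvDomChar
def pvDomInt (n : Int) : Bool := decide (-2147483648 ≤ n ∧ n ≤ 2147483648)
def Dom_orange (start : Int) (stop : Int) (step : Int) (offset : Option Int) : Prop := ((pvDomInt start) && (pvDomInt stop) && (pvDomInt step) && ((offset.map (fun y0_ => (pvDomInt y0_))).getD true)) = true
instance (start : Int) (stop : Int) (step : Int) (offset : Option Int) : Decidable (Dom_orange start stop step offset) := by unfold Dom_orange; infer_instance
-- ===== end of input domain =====

-- B replaces A's emit-while-advancing generator loop by a closed-form boundary list
-- (built with range()) that is then paired consecutively; equivalence is about the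
-- sequence of yielded pairs (both are generators).

-- ===== PORT A =====
-- A's while loop, ported with a fuel counter; pvFuel_orange iterations suffice
-- whenever the Python loop terminates (exactly the inputs admitted by Pre_orange).
def pvFuel_orange (start : Int) (stop : Int) (offset : Option Int) : Nat :=
  (stop - start).toNat + (match offset with | some o => (-o).toNat | none => 0) + 2

def orangeLoopA (fuel : Nat) (i : Int) (stop : Int) (step : Int) (offset : Option Int) :
    List (Int × Int) :=
  match fuel with
  | 0 => []
  | f + 1 =>
    if i < stop then
      let j :=
        match offset with
        | some o => min (i + o) stop   -- j = i + offset; offset = None; j = min(j, stop)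
        | none => min (i + step) stop  -- j = i + step;  j = min(j, stop)
      (i, j) :: orangeLoopA f j stop step none
    else []

def orange (start : Int) (stop : Int) (step : Int) (offset : Option Int) : List (Int × Int) :=
  orangeLoopA (pvFuel_orange start stop offset) start stop step offset

-- ===== PORT B =====
def orange_alt (start : Int) (stop : Int) (step : Int) (offset : Option Int) : List (Int × Int) :=
  if start ≥ stop then []
  else
    let first := min (start + (match offset with | none => step | some o => o)) stop
    let points := [start, first] ++
      (if first < stop then PySem.List.pyRange (first + step) stop step ++ [stop] else [])
    points.zip points.tail   -- yield from zip(points, points[1:])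

-- ===== PRECONDITION & SPEC =====
-- Pre_ excludes exactly the inputs on which A's generator never terminates (the loop is
-- entered and neither the one-shot offset nor a positive step can ever reach stop).
def Pre_orange (start : Int) (stop : Int) (step : Int) (offset : Option Int) : Prop :=
  start ≥ stop ∨ stop ≤ start + (offset.getD step) ∨ 0 < step
instance (start : Int) (stop : Int) (step : Int) (offset : Option Int) : Decidable (Pre_orange start stop step offset) := by unfold Pre_orange; infer_instance

def pvWitness_orange : Int × Int × Int × Option Int := (0, 10, 3, some 2)

def Spec_orange (start : Int) (stop : Int) (step : Int) (offset : Option Int) (out : List (Int × Int)) : Prop := out = orange_alt start stop step offset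
instance (start : Int) (stop : Int) (step : Int) (offset : Option Int) (out : List (Int × Int)) : Decidable (Spec_orange start stop step offset out) := by unfold Spec_orange; infer_instance

-- ===== CLAIM (what is proved, stated in full; the proofs are below) =====
def Claim_equal_orange : Prop := ∀ (start : Int) (stop : Int) (step : Int) (offset : Option Int), Dom_orange start stop step offset → Pre_orange start stop step offset → Spec_orange start stop step offset (orange start stop step offset)

-- ===== LEMMAS AND PROOFS =====

theorem orangeLoopA_nil (fuel : Nat) (i stop step : Int) (offset : Option Int)
    (h : ¬ i < stop) : orangeLoopA fuel i stop step offset = [] := by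
  cases fuel <;> simp [orangeLoopA, h]

theorem orangeLoopA_succ (f : Nat) (i stop step : Int) (off : Option Int) (h : i < stop) :
    orangeLoopA (f + 1) i stop step off =
      (i, min (i + off.getD step) stop) ::
        orangeLoopA f (min (i + off.getD step) stop) stop step none := by
  cases off <;> simp [orangeLoopA, h]

theorem pyRange_pos_nil (a b s : Int) (hs : 0 < s) (h : b ≤ a) :
    PySem.List.pyRange a b s = [] := by
  rw [PySem.List.pyRange_of_pos a b hs]
  simp [show ¬ a < b by omega]

theorem pyRange_pos_cons (a b s : Int) (hs : 0 < s) (h : a < b) :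
    PySem.List.pyRange a b s = a :: PySem.List.pyRange (a + s) b s := by
  rw [PySem.List.pyRange_of_pos a b hs, PySem.List.pyRange_of_pos (a + s) b hs]
  by_cases h2 : a + s < b
  · rw [if_pos h, if_pos h2]
    have key : (b - a + s - 1) / s = (b - (a + s) + s - 1) / s + 1 := by
      have e : b - a + s - 1 = (b - (a + s) + s - 1) + 1 * s := by ring
      rw [e, Int.add_mul_ediv_right _ _ (by omega : s ≠ 0)]
    have hnn : 0 ≤ (b - (a + s) + s - 1) / s :=
      Int.ediv_nonneg (by omega) (by omega)
    have keyN : ((b - a + s - 1) / s).toNat = ((b - (a + s) + s - 1) / s).toNat + 1 := by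
      omega
    rw [keyN, List.range_succ_eq_map, List.map_cons, List.map_map]
    congr 1
    · simp
    · apply List.map_congr_left
      intro k _
      simp only [Function.comp]
      push_cast
      ring
  · rw [if_pos h, if_neg h2]
    have hq : (b - a + s - 1) / s = 1 := by
      have d1 : 1 ≤ (b - a + s - 1) / s := (Int.le_ediv_iff_mul_le hs).mpr (by omega)
      have d2 : (b - a + s - 1) / s < 2 := (Int.ediv_lt_iff_lt_mul hs).mpr (by omega)
      omega
    rw [hq]
    simp

-- For step ≥ 1 and no pending offset, A's loop produces exactly the consecutive pairs of
-- the boundary list i :: range(i+step, stop, step) ++ [stop].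
theorem orangeLoopA_pos (n : Nat) : ∀ (fuel : Nat) (i stop step : Int),
    0 < step → i < stop → (stop - i).toNat ≤ n → n ≤ fuel →
    orangeLoopA fuel i stop step none =
      (i :: (PySem.List.pyRange (i + step) stop step ++ [stop])).zip
        (PySem.List.pyRange (i + step) stop step ++ [stop]) := by
  induction n with
  | zero => intro fuel i stop step hs hi hn _; omega
  | succ m ih =>
    intro fuel i stop step hs hi hn hf
    cases fuel with
    | zero => omega
    | succ f =>
      rw [orangeLoopA_succ f i stop step none hi]
      simp only [Option.getD]
      by_cases h2 : i + step < stop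
      · have hmin : min (i + step) stop = i + step := by omega
        rw [hmin, ih f (i + step) stop step hs h2 (by omega) (by omega),
          pyRange_pos_cons (i + step) stop step hs h2]
        simp [List.zip]
      · have hmin : min (i + step) stop = stop := by omega
        rw [hmin, orangeLoopA_nil f stop stop step none (by omega),
          pyRange_pos_nil (i + step) stop step hs (by omega)]
        simp [List.zip]

-- The first loop iteration plus the positive-step tail equals B's zipped boundary list.
theorem orange_core (start stop step m : Int) (f : Nat)
    (_hm : m ≤ stop) (hs : m < stop → 0 < step) (hf : (stop - m).toNat ≤ f) :
    (start, m) :: orangeLoopA f m stop step none =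
      ([start, m] ++
        (if m < stop then PySem.List.pyRange (m + step) stop step ++ [stop] else [])).zip
      (([start, m] ++
        (if m < stop then PySem.List.pyRange (m + step) stop step ++ [stop] else [])).tail) := by
  by_cases h : m < stop
  · rw [if_pos h, orangeLoopA_pos ((stop - m).toNat) f m stop step (hs h) h le_rfl hf]
    simp [List.zip]
  · rw [if_neg h, orangeLoopA_nil f m stop step none h]
    simp [List.zip]

-- ===== VERDICT (by name: the statement is the Claim_ definition above) =====
theorem orange_spec : Claim_equal_orange := by
  intro start stop step offset _ hpre
  unfold Spec_orange orange orange_alt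
  by_cases h0 : start ≥ stop
  · rw [orangeLoopA_nil _ _ _ _ _ (by omega), if_pos h0]
  · rw [if_neg h0]
    have hlt : start < stop := by omega
    unfold Pre_orange at hpre
    cases offset with
    | none =>
      rw [show pvFuel_orange start stop none = ((stop - start).toNat + 1) + 1 from by
        simp only [pvFuel_orange]; try omega]
      rw [orangeLoopA_succ _ _ _ _ _ hlt]
      simp only [Option.getD_none] at hpre ⊢
      exact orange_core start stop step _ _ (by omega) (by omega) (by omega)
    | some o =>
      rw [show pvFuel_orange start stop (some o) =
          ((stop - start).toNat + (-o).toNat + 1) + 1 from by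
        simp only [pvFuel_orange]; try omega]
      rw [orangeLoopA_succ _ _ _ _ _ hlt]
      simp only [Option.getD_some] at hpre ⊢
      exact orange_core start stop step _ _ (by omega) (by omega) (by omega)
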